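-- pv_equiv track=rewrite | github.com/pierpierpy/LightML | lightml/stats.py | contingency_table
-- ===== SOURCE A (Python) =====
-- def contingency_table(scores_a, scores_b):
--     if len(scores_a) != len(scores_b):
--         raise ValueError(
--             f"Score vectors must have same length: {len(scores_a)} vs {len(scores_b)}"
--         )
--
--     both_correct = sum(1 for a, b in zip(scores_a, scores_b) if a == 1 and b == 1)
--     only_a = sum(1 for a, b in zip(scores_a, scores_b) if a == 1 and b == 0)
--     only_b = sum(1 for a, b in zip(scores_a, scores_b) if a == 0 and b == 1)
--     both_wrong = sum(1 for a, b in zip(scores_a, scores_b) if a == 0 and b == 0)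
--
--     return {
--         "both_correct": both_correct,
--         "only_a": only_a,
--         "only_b": only_b,
--         "both_wrong": both_wrong,
--         "n_discordant": only_a + only_b,
--         "n_total": len(scores_a),
--     }
-- ===== SOURCE B (Python) =====
-- def contingency_table(scores_a, scores_b):
--     if len(scores_a) != len(scores_b):
--         raise ValueError(
--             f"Score vectors must have same length: {len(scores_a)} vs {len(scores_b)}"
--         )
--
--     counts = {}
--     for pair in zip(scores_a, scores_b):
--         counts[pair] = counts.get(pair, 0) + 1
--
--     only_a = counts.get((1, 0), 0)
--     only_b = counts.get((0, 1), 0)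
--
--     return {
--         "both_correct": counts.get((1, 1), 0),
--         "only_a": only_a,
--         "only_b": only_b,
--         "both_wrong": counts.get((0, 0), 0),
--         "n_discordant": only_a + only_b,
--         "n_total": len(scores_a),
--     }
-- ===== Notes on version B (the rewrite author's own statement) =====
-- stated objective: alternative
-- what changed: B replaces A's four separate conditional scans over zip(scores_a, scores_b) with a single pass that tabulates a frequency dictionary of pairs and then reads the four buckets by key lookup.
import Mathlib
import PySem

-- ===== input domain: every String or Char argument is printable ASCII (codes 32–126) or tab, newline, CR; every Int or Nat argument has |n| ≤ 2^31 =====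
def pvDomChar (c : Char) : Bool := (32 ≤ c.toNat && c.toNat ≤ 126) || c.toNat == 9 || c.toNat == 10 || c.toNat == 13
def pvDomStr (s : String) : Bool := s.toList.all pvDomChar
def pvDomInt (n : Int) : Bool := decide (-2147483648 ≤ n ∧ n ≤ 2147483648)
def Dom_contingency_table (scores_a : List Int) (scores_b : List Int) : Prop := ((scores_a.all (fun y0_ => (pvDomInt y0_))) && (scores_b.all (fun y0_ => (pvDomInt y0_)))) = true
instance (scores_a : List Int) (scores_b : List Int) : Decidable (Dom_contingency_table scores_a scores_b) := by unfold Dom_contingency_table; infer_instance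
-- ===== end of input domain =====

-- B tabulates the (a,b) pairs once into a frequency dictionary and reads the four buckets by lookup, instead of A's four conditional scans (alternative decomposition, same O(n) cost).


-- ===== PORT A =====
def contingency_table (scores_a : List Int) (scores_b : List Int) : List (String × Int) :=
  let z := scores_a.zip scores_b
  let both_correct := z.foldl (fun acc p => if p.1 = 1 ∧ p.2 = 1 then acc + 1 else acc) (0 : Int)
  let only_a := z.foldl (fun acc p => if p.1 = 1 ∧ p.2 = 0 then acc + 1 else acc) (0 : Int)
  let only_b := z.foldl (fun acc p => if p.1 = 0 ∧ p.2 = 1 then acc + 1 else acc) (0 : Int)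
  let both_wrong := z.foldl (fun acc p => if p.1 = 0 ∧ p.2 = 0 then acc + 1 else acc) (0 : Int)
  [("both_correct", both_correct), ("only_a", only_a), ("only_b", only_b),
   ("both_wrong", both_wrong), ("n_discordant", only_a + only_b),
   ("n_total", (scores_a.length : Int))]

-- ===== PORT B =====
def contingency_table_alt (scores_a : List Int) (scores_b : List Int) : List (String × Int) :=
  let counts : PySem.Dict (Int × Int) Int :=
    (scores_a.zip scores_b).foldl (fun d pair => d.insert pair (d.getD pair 0 + 1)) PySem.Dict.empty
  let only_a := counts.getD (1, 0) 0
  let only_b := counts.getD (0, 1) 0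
  [("both_correct", counts.getD (1, 1) 0), ("only_a", only_a), ("only_b", only_b),
   ("both_wrong", counts.getD (0, 0) 0), ("n_discordant", only_a + only_b),
   ("n_total", (scores_a.length : Int))]

-- ===== PRECONDITION & SPEC =====
-- Pre_ excludes exactly the inputs where A raises ValueError (unequal lengths).
def Pre_contingency_table (scores_a : List Int) (scores_b : List Int) : Prop := scores_a.length = scores_b.length
instance (scores_a : List Int) (scores_b : List Int) : Decidable (Pre_contingency_table scores_a scores_b) := by unfold Pre_contingency_table; infer_instance
def pvWitness_contingency_table : List Int × List Int := ([1, 0, 1], [1, 1, 0])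
def Spec_contingency_table (scores_a : List Int) (scores_b : List Int) (out : List (String × Int)) : Prop := out = contingency_table_alt scores_a scores_b
instance (scores_a : List Int) (scores_b : List Int) (out : List (String × Int)) : Decidable (Spec_contingency_table scores_a scores_b out) := by unfold Spec_contingency_table; infer_instance

-- ===== CLAIM (what is proved, stated in full; the proofs are below) =====
def Claim_equal_contingency_table : Prop := ∀ (scores_a : List Int) (scores_b : List Int), Dom_contingency_table scores_a scores_b → Pre_contingency_table scores_a scores_b → Spec_contingency_table scores_a scores_b (contingency_table scores_a scores_b)

-- ===== LEMMAS AND PROOFS =====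

theorem pvFoldlCount (x y : Int) : ∀ (z : List (Int × Int)) (acc : Int),
    z.foldl (fun acc p => if p.1 = x ∧ p.2 = y then acc + 1 else acc) acc
      = acc + (z.count (x, y) : Int) := by
  intro z
  induction z with
  | nil => intro acc; simp
  | cons h t ih =>
    intro acc
    by_cases hc : h.1 = x ∧ h.2 = y
    · have hhk : h = (x, y) := by obtain ⟨h1, h2⟩ := hc; cases h; simp_all
      simp [List.foldl_cons, ih, hhk]
      ring
    · have hhk : h ≠ (x, y) := by intro he; apply hc; cases h; cases he; exact ⟨rfl, rfl⟩
      simp [List.foldl_cons, hc, ih, hhk]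

theorem pvGetDCounter (x y : Int) (z : List (Int × Int)) :
    (z.foldl (fun d pair => d.insert pair (d.getD pair 0 + 1)) PySem.Dict.empty).getD (x, y) 0
      = (z.count (x, y) : Int) := by
  rw [PySem.Dict.foldl_insert_getD_add_one_eq_counter, PySem.Dict.getD_counter]

-- ===== VERDICT (by name: the statement is the Claim_ definition above) =====
theorem contingency_table_spec : Claim_equal_contingency_table := by
  intro sa sb _ _
  unfold Spec_contingency_table contingency_table contingency_table_alt
  simp only [pvFoldlCount, pvGetDCounter, Int.zero_add]
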